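-- pv_equiv track=rewrite | github.com/wolfiesch/wolfxl | python/wolfxl/worksheet/header_footer.py | validate_header_footer_format
-- ===== SOURCE A (Python) =====
-- def validate_header_footer_format(text: str) -> bool:
--     """Return True iff ``text`` parses as a valid OOXML header/footer string.
--
--     "Valid" means: every ``&`` is followed by a recognized code or is
--     a ``&&`` literal escape. Unknown single-letter codes (e.g. invented
--     by a later spec revision) are treated as opaque - they pass through
--     unchanged for forward compat.
--
--     The function never raises; it returns False for clearly malformed
--     inputs (a trailing bare ``&`` with no code character, an unclosed
--     quoted font block).
--     """
--     if text is None: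
--         return True
--     i = 0
--     n = len(text)
--     while i < n:
--         ch = text[i]
--         if ch != "&":
--             i += 1
--             continue
--         if i + 1 >= n:
--             return False
--         nxt = text[i + 1]
--         if nxt == "&":
--             i += 2
--             continue
--         if nxt == '"':
--             close = text.find('"', i + 2)
--             if close == -1:
--                 return False
--             i = close + 1
--             continue
--         if nxt in ("K", "k"):
--             if i + 2 >= n:
--                 return False
--             if text[i + 2] == "{":
--                 if i + 9 >= n or text[i + 9] != "}":
--                     return False
--                 if not all(c in "0123456789abcdefABCDEF" for c in text[i + 3:i + 9]):
--                     return False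
--                 i += 10
--                 continue
--             if i + 8 > n:
--                 return False
--             if not all(c in "0123456789abcdefABCDEF" for c in text[i + 2:i + 8]):
--                 return False
--             i += 8
--             continue
--         if nxt.isdigit():
--             j = i + 1
--             while j < n and text[j].isdigit():
--                 j += 1
--             i = j
--             continue
--         if nxt.isalpha():
--             i += 2
--             continue
--         return False
--     return True
-- ===== SOURCE B (Python) =====
-- _HEX = frozenset("0123456789abcdefABCDEF")
--
--
-- def _hex6(s):
--     return all(c in _HEX for c in s)
--
--
-- def validate_header_footer_format(text: str) -> bool:
--     """Split once on '&' and validate the list of '&'-delimited segments: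
--     each segment after the first must begin with a recognized code (its
--     trailing text is plain); quoted font blocks may swallow whole segments
--     until one contains the closing quote."""
--     if text is None:
--         return True
--     segs = text.split("&")[1:]
--     while segs:
--         p, segs = segs[0], segs[1:]
--         if p == "":
--             # the '&' was doubled: '&&' literal, next segment is plain text
--             if not segs:
--                 return False  # dangling escape at end of text
--             segs = segs[1:]
--         elif p[0] == '"':
--             if '"' not in p[1:]:
--                 while segs and '"' not in segs[0]:
--                     segs = segs[1:]
--                 if not segs:
--                     return False  # unclosed quoted font block
--                 segs = segs[1:]
--         elif p[0] in 'Kk':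
--             body = p[1:]
--             if body[:1] == "{":
--                 if len(body) < 8 or body[7] != "}" or not _hex6(body[1:7]):
--                     return False
--             elif len(body) < 6 or not _hex6(body[:6]):
--                 return False
--         elif not (p[0].isdigit() or p[0].isalpha()):
--             return False
--     return True
-- ===== Notes on version B (the rewrite author's own statement) =====
-- stated objective: faster
-- what changed: Replaces A's per-character index-arithmetic scanner with a staged pass: split the text once on the escape character and validate the resulting segment list (each segment must begin with a recognized code, its trailing text being plain; a quoted font block swallows whole segments until one contains the closing quote); the single C-level str.split removes the per-character Python loop.
import Mathlib
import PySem

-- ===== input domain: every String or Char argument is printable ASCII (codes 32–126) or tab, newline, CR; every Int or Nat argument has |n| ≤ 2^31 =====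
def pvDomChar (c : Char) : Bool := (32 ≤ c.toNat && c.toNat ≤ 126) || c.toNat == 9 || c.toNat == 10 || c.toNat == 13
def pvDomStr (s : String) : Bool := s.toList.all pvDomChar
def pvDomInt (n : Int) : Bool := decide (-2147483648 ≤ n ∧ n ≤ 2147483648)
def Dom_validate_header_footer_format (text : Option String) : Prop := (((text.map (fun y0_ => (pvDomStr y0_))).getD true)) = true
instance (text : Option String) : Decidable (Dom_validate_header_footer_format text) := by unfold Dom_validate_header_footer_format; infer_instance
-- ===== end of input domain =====

-- B splits the text once on the escape character and validates the resulting list of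
-- segments (each must begin with a recognized code; quoted font blocks may swallow whole
-- segments), instead of A's per-character index scanner; objective: faster (measured).

-- ===== PORT A =====

-- the hex-digit alphabet "0123456789abcdefABCDEF" used by A's `c in "…"` membership tests
def pvHexA : List Char := "0123456789abcdefABCDEF".toList

-- A's inner `while j < n and text[j].isdigit(): j += 1` loop (fuel only guards totality;
-- the wrapper passes enough fuel for every iteration the Python loop performs)
def pvDigitEnd (s : List Char) (fuel j : Nat) : Nat :=
  match fuel with
  | 0 => j
  | fuel + 1 =>
    if j < s.length ∧ PySem.Chars.isdigit (s.getD j ' ') then pvDigitEnd s fuel (j + 1) else j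

-- A's main `while i < n` loop, transliterated with the index i (n = len(text) = s.length);
-- fuel only guards totality: i strictly increases, so s.length + 1 steps always suffice
def pvAGo (s : List Char) (fuel i : Nat) : Bool :=
  match fuel with
  | 0 => true
  | fuel + 1 =>
    if i < s.length then
      if s.getD i ' ' ≠ '&' then pvAGo s fuel (i + 1)
      else if i + 1 ≥ s.length then false
      else if s.getD (i + 1) ' ' = '&' then pvAGo s fuel (i + 2)
      else if s.getD (i + 1) ' ' = '"' then
        -- close = text.find('"', i + 2)
        let close := PySem.Chars.findFrom s ['"'] ((i + 2 : Nat) : Int) none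
        if close = -1 then false else pvAGo s fuel (close.toNat + 1)
      else if s.getD (i + 1) ' ' = 'K' ∨ s.getD (i + 1) ' ' = 'k' then
        if i + 2 ≥ s.length then false
        else if s.getD (i + 2) ' ' = '{' then
          if i + 9 ≥ s.length ∨ s.getD (i + 9) ' ' ≠ '}' then false
          else if ¬ (PySem.List.slice s (some ((i + 3 : Nat) : Int)) (some ((i + 9 : Nat) : Int))).all
              (fun c => decide (c ∈ pvHexA)) then false
          else pvAGo s fuel (i + 10)
        else if i + 8 > s.length then false
        else if ¬ (PySem.List.slice s (some ((i + 2 : Nat) : Int)) (some ((i + 8 : Nat) : Int))).all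
            (fun c => decide (c ∈ pvHexA)) then false
        else pvAGo s fuel (i + 8)
      else if PySem.Chars.isdigit (s.getD (i + 1) ' ') then pvAGo s fuel (pvDigitEnd s s.length (i + 1))
      else if PySem.Chars.isalpha (s.getD (i + 1) ' ') then pvAGo s fuel (i + 2)
      else false
    else true

def validate_header_footer_format (text : Option String) : Bool :=
  match text with
  | none => true
  | some t => pvAGo t.toList (t.toList.length + 1) 0

-- ===== PORT B =====

-- _HEX = frozenset("0123456789abcdefABCDEF")
def pvHexSet : PySem.Set Char := PySem.Set.ofList "0123456789abcdefABCDEF".toList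

-- _hex6(s): all(c in _HEX for c in s)
def pvHex6 (s : List Char) : Bool := s.all (fun c => decide (c ∈ pvHexSet))

-- B's inner `while segs and '"' not in segs[0]: segs = segs[1:]` loop (returns the remaining segs)
def pvDropNoQuote : List (List Char) → List (List Char)
  | [] => []
  | q :: rest => if PySem.Chars.isIn ['"'] q then q :: rest else pvDropNoQuote rest

-- needed by pvBLoop's termination: the quote scan never lengthens the segment list
theorem pvDropNoQuote_le (l : List (List Char)) : (pvDropNoQuote l).length ≤ l.length := by
  induction l with
  | nil => simp [pvDropNoQuote]
  | cons q rest ih =>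
    by_cases h : PySem.Chars.isIn ['"'] q <;> simp [pvDropNoQuote, h] <;> omega

-- B's main `while segs:` loop, consuming the suffix list of segments
def pvBLoop : List (List Char) → Bool
  | [] => true
  | p :: segs =>
    if p = [] then
      match segs with
      | [] => false                          -- dangling escape at end of text
      | _ :: segs' => pvBLoop segs'          -- '&&' literal: next segment is plain text
    else if p.headD ' ' = '"' then
      if PySem.Chars.isIn ['"'] (p.drop 1) then pvBLoop segs
      else
        match h : pvDropNoQuote segs with
        | [] => false                        -- unclosed quoted font block
        | _ :: segs' => pvBLoop segs'
    else if p.headD ' ' = 'K' ∨ p.headD ' ' = 'k' then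
      if (p.drop 1).take 1 = ['{'] then
        if (p.drop 1).length < 8 ∨ (p.drop 1).getD 7 ' ' ≠ '}' ∨
            ¬ pvHex6 (PySem.List.slice (p.drop 1) (some 1) (some 7)) then false
        else pvBLoop segs
      else if (p.drop 1).length < 6 ∨ ¬ pvHex6 (PySem.List.slice (p.drop 1) none (some 6)) then false
      else pvBLoop segs
    else if PySem.Chars.isdigit (p.headD ' ') || PySem.Chars.isalpha (p.headD ' ') then pvBLoop segs
    else false
termination_by l => l.length
decreasing_by
  all_goals simp
  all_goals try omega
  all_goals (have hle := pvDropNoQuote_le segs; rw [h] at hle; simp at hle; omega)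

def validate_header_footer_format_alt (text : Option String) : Bool :=
  match text with
  | none => true
  | some t => pvBLoop ((PySem.Chars.splitOn t.toList ['&']).drop 1)

-- ===== PRECONDITION & SPEC =====
def Spec_validate_header_footer_format (text : Option String) (out : Bool) : Prop := out = validate_header_footer_format_alt text
instance (text : Option String) (out : Bool) : Decidable (Spec_validate_header_footer_format text out) := by unfold Spec_validate_header_footer_format; infer_instance

-- ===== CLAIM (what is proved, stated in full; the proofs are below) =====
def Claim_equal_validate_header_footer_format : Prop := ∀ (text : Option String), Dom_validate_header_footer_format text → Spec_validate_header_footer_format text (validate_header_footer_format text)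

-- ===== LEMMAS AND PROOFS =====

-- proof-side character-level spec: a direct recursion over the character stream
def pvHexB : PySem.Set Char := PySem.Set.ofList "0123456789abcdefABCDEF".toList

def pvNotHex (c? : Option Char) : Bool :=
  match c? with
  | some c => ¬ decide (c ∈ pvHexB)
  | none => true

def pvTake (l : List Char) (k : Nat) : List (Option Char) :=
  (List.range k).map (fun j => l[j]?)

-- quote scan: first component: a closing quote was found; second: the remaining characters
def pvQuoteScan (l : List Char) : Bool × List Char :=
  match l with
  | [] => (false, [])
  | d :: rest => if d = '"' then (true, rest) else pvQuoteScan rest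

def pvBGo (fuel : Nat) (l : List Char) : Bool :=
  match fuel, l with
  | _, [] => true
  | 0, _ :: _ => true
  | fuel + 1, ch :: it =>
    if ch ≠ '&' then pvBGo fuel it
    else
      match it with
      | [] => false
      | code :: it2 =>
        if code = '&' then pvBGo fuel it2
        else if code = '"' then
          if (pvQuoteScan it2).1 then pvBGo fuel (pvQuoteScan it2).2 else false
        else if code = 'K' ∨ code = 'k' then
          let first := it2[0]?
          let it3 := it2.drop 1
          if first = some '{' then
            let chunk := pvTake it3 7
            if chunk.getD 6 none ≠ some '}' ∨ (chunk.take 6).any pvNotHex then false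
            else pvBGo fuel (it3.drop 7)
          else
            let chunk := first :: pvTake it3 5
            if chunk.any pvNotHex then false
            else pvBGo fuel (it3.drop 5)
        else if PySem.Chars.isdigit code || PySem.Chars.isalpha code then pvBGo fuel it2
        else false

def pvB (l : List Char) : Bool := pvBGo (l.length + 1) l

theorem pvQuoteScan_length (l : List Char) : (pvQuoteScan l).2.length ≤ l.length := by
  induction l with
  | nil => simp [pvQuoteScan]
  | cons d rest ih =>
    by_cases hd : d = '"' <;> simp [pvQuoteScan, hd] <;> omega

theorem pvBGo_eq_pvB (f : Nat) : ∀ l : List Char, l.length < f → pvBGo f l = pvB l := by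
  induction f using Nat.strong_induction_on with
  | _ f ih =>
    intro l hl
    obtain ⟨f', rfl⟩ : ∃ f', f = f' + 1 := ⟨f - 1, by omega⟩
    cases l with
    | nil => rfl
    | cons ch it =>
      have hit : it.length < f' := by simp at hl; omega
      simp only [pvB, List.length_cons, pvBGo]
      by_cases hch : ch ≠ '&'
      · rw [if_pos hch, if_pos hch, ih f' (by omega) it hit, ih (it.length + 1) (by omega) it (by omega)]
      · rw [if_neg hch, if_neg hch]
        cases it with
        | nil => rfl
        | cons code it2 =>
          have h2 : it2.length < f' := by simp at hit; omega
          have hq := pvQuoteScan_length it2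
          have hd1 : (it2.drop 1).length ≤ it2.length := by simp
          simp only [List.length_cons] at hit
          simp only [List.length_cons]
          by_cases h1 : code = '&'
          · rw [if_pos h1, if_pos h1, ih f' (by omega) it2 h2,
              ih (it2.length + 1 + 1) (by omega) it2 (by omega)]
          · rw [if_neg h1, if_neg h1]
            by_cases hcq : code = '"'
            · rw [if_pos hcq, if_pos hcq, ih f' (by omega) (pvQuoteScan it2).2 (by omega),
                ih (it2.length + 1 + 1) (by omega) (pvQuoteScan it2).2 (by omega)]
            · rw [if_neg hcq, if_neg hcq]
              by_cases hck : code = 'K' ∨ code = 'k'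
              · rw [if_pos hck, if_pos hck,
                  ih f' (by omega) ((it2.drop 1).drop 7) (by simp; omega),
                  ih (it2.length + 1 + 1) (by omega) ((it2.drop 1).drop 7) (by simp; omega),
                  ih f' (by omega) ((it2.drop 1).drop 5) (by simp; omega),
                  ih (it2.length + 1 + 1) (by omega) ((it2.drop 1).drop 5) (by simp; omega)]
              · rw [if_neg hck, if_neg hck]
                by_cases hda : (PySem.Chars.isdigit code || PySem.Chars.isalpha code) = true
                · rw [if_pos hda, if_pos hda, ih f' (by omega) it2 h2,
                    ih (it2.length + 1 + 1) (by omega) it2 (by omega)]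
                · rw [if_neg hda, if_neg hda]

theorem pvB_nil : pvB [] = true := rfl

theorem pvB_plain (ch : Char) (it : List Char) (h : ch ≠ '&') : pvB (ch :: it) = pvB it := by
  simp only [pvB, List.length_cons, pvBGo]
  rw [if_pos h, pvBGo_eq_pvB (it.length + 1) it (by omega)]

theorem pvB_amp_nil : pvB ['&'] = false := rfl

theorem pvB_amp (code : Char) (it2 : List Char) :
    pvB ('&' :: code :: it2) =
      (if code = '&' then pvB it2
      else if code = '"' then
        (if (pvQuoteScan it2).1 then pvB (pvQuoteScan it2).2 else false)
      else if code = 'K' ∨ code = 'k' then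
        (if it2[0]? = some '{' then
          (if (pvTake (it2.drop 1) 7).getD 6 none ≠ some '}' ∨ ((pvTake (it2.drop 1) 7).take 6).any pvNotHex then false
          else pvB ((it2.drop 1).drop 7))
        else
          (if (it2[0]? :: pvTake (it2.drop 1) 5).any pvNotHex then false
          else pvB ((it2.drop 1).drop 5)))
      else if PySem.Chars.isdigit code || PySem.Chars.isalpha code then pvB it2
      else false) := by
  have hq := pvQuoteScan_length it2
  have hd1 : (it2.drop 1).length ≤ it2.length := by simp
  simp only [pvB, List.length_cons, pvBGo]
  rw [if_neg (by simp : ¬ ('&' ≠ '&')),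
    pvBGo_eq_pvB (it2.length + 1 + 1) it2 (by omega),
    pvBGo_eq_pvB (it2.length + 1 + 1) (pvQuoteScan it2).2 (by omega),
    pvBGo_eq_pvB (it2.length + 1 + 1) ((it2.drop 1).drop 7) (by simp; omega),
    pvBGo_eq_pvB (it2.length + 1 + 1) ((it2.drop 1).drop 5) (by simp; omega)]
  rfl

-- a character the spec treats as plain text is skipped one step at a time
theorem pvSkip (s : List Char) (a b : Nat) (hab : a ≤ b)
    (h : ∀ t, a ≤ t → t < b → s.getD t ' ' ≠ '&') :
    pvB (s.drop a) = pvB (s.drop b) := by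
  rcases Nat.lt_or_ge a b with hlt | hge
  · by_cases ha : a < s.length
    · rw [List.drop_eq_getElem_cons ha]
      have hne : s[a] ≠ '&' := by
        have := h a (le_refl a) hlt
        rwa [List.getD_eq_getElem s ' ' ha] at this
      rw [pvB_plain _ _ hne]
      exact pvSkip s (a + 1) b (by omega) (fun t h1 h2 => h t (by omega) h2)
    · rw [List.drop_of_length_le (by omega), List.drop_of_length_le (by omega)]
  · have : a = b := by omega
    rw [this]
termination_by b - a

theorem pvQuoteScan_found_iff (l : List Char) : (pvQuoteScan l).1 = true ↔ '"' ∈ l := by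
  induction l with
  | nil => simp [pvQuoteScan]
  | cons d rest ih =>
    by_cases hd : d = '"' <;> simp [pvQuoteScan, hd, ih, eq_comm]

theorem pvQuoteScan_first (l : List Char) (j : Nat)
    (hj : l[j]? = some '"') (hmin : ∀ t, t < j → l[t]? ≠ some '"') :
    pvQuoteScan l = (true, l.drop (j + 1)) := by
  induction j generalizing l with
  | zero =>
    cases l with
    | nil => simp at hj
    | cons d rest => simp at hj; simp [pvQuoteScan, hj]
  | succ k ih =>
    cases l with
    | nil => simp at hj
    | cons d rest =>
      have hd : d ≠ '"' := by
        have := hmin 0 (by omega); simpa using this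
      simp only [List.getElem?_cons_succ] at hj
      rw [pvQuoteScan]
      simp only [if_neg hd]
      rw [ih rest hj (fun t ht => by simpa using hmin (t + 1) (by omega))]
      rfl

theorem pvSingletonPrefix (c : Char) (m : List Char) : [c] <+: m ↔ m.head? = some c := by
  cases m <;> simp [List.prefix_cons_iff, eq_comm]

-- the spec's quote scan over the tail equals A's text.find('"', k) (k = i + 2 ≤ len)
theorem pvQuoteFind (s : List Char) (k : Nat) (hk : k ≤ s.length) :
    (PySem.Chars.findFrom s ['"'] (k : Int) none = -1 → (pvQuoteScan (s.drop k)).1 = false) ∧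
    (PySem.Chars.findFrom s ['"'] (k : Int) none ≠ -1 →
      pvQuoteScan (s.drop k) =
        (true, s.drop ((PySem.Chars.findFrom s ['"'] (k : Int) none).toNat + 1))) := by
  constructor
  · intro h
    rw [PySem.Chars.findFrom_natCast_eq_neg_one_iff s ['"'] k hk] at h
    rw [Bool.eq_false_iff, Ne, pvQuoteScan_found_iff]
    intro hmem
    exact h ((List.singleton_infix_iff '"' (s.drop k)).mpr hmem)
  · intro hne
    obtain ⟨hge, hpre, hmin⟩ := PySem.Chars.findFrom_natCast_spec s ['"'] k hk hne
    have hk' : k ≤ (PySem.Chars.findFrom s ['"'] (k : Int) none).toNat := by omega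
    generalize hf : (PySem.Chars.findFrom s ['"'] (k : Int) none).toNat = fn at hk' hpre hmin ⊢
    have hj : (s.drop k)[fn - k]? = some '"' := by
      rw [pvSingletonPrefix] at hpre
      rw [List.getElem?_drop]
      have : k + (fn - k) = fn := by omega
      rw [this, ← List.head?_drop]
      exact hpre
    have hmin' : ∀ t, t < fn - k → (s.drop k)[t]? ≠ some '"' := by
      intro t ht
      have := hmin (k + t) (by omega) (by omega)
      rw [pvSingletonPrefix, List.head?_drop] at this
      rwa [List.getElem?_drop]
    rw [pvQuoteScan_first (s.drop k) (fn - k) hj hmin', List.drop_drop]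
    have heq : k + (fn - k + 1) = fn + 1 := by omega
    rw [heq]

theorem pvDigit_ne_amp (c : Char) (h : PySem.Chars.isdigit c) : c ≠ '&' := by
  intro hc; rw [hc] at h; exact absurd h (by decide)

theorem pvDigitEnd_le (s : List Char) (f : Nat) : ∀ j : Nat, j ≤ pvDigitEnd s f j := by
  induction f with
  | zero => intro j; simp [pvDigitEnd]
  | succ f ih =>
    intro j
    simp only [pvDigitEnd]
    split
    · exact le_trans (by omega) (ih (j + 1))
    · exact le_refl j

theorem pvDigitEnd_digits (s : List Char) (f : Nat) :
    ∀ j t, j ≤ t → t < pvDigitEnd s f j → PySem.Chars.isdigit (s.getD t ' ') := by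
  induction f with
  | zero => intro j t h1 h2; simp [pvDigitEnd] at h2; omega
  | succ f ih =>
    intro j t h1 h2
    simp only [pvDigitEnd] at h2
    split at h2
    · rename_i hcond
      rcases Nat.eq_or_lt_of_le h1 with rfl | hlt
      · exact hcond.2
      · exact ih (j + 1) t hlt h2
    · omega

theorem pvDigitEnd_step (s : List Char) (f j : Nat)
    (h : j < s.length ∧ PySem.Chars.isdigit (s.getD j ' ')) :
    pvDigitEnd s (f + 1) j = pvDigitEnd s f (j + 1) := by
  simp only [pvDigitEnd, if_pos h]

theorem pvHexAB (c : Char) : (c ∈ pvHexB) ↔ c ∈ pvHexA := by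
  unfold pvHexB pvHexA
  simp [pysem]

-- the k-chunk of draws is all-hex iff the underlying take k is full and all-hex
theorem pvChunkAll (l : List Char) (k : Nat) :
    (pvTake l k).any pvNotHex = false ↔ k ≤ l.length ∧ (l.take k).all (fun c => decide (c ∈ pvHexA)) = true := by
  simp only [pvTake, List.any_eq_false, List.mem_map, List.mem_range, List.all_eq_true]
  constructor
  · intro h
    have hlen : k ≤ l.length := by
      by_contra hlt
      have := h l[l.length]? ⟨l.length, by omega, rfl⟩
      simp [pvNotHex] at this
    refine ⟨hlen, fun c hc => ?_⟩
    rw [List.mem_take_iff_getElem] at hc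
    obtain ⟨j, hjk, hcj⟩ := hc
    have hj : j < k := by omega
    have := h l[j]? ⟨j, hj, rfl⟩
    have hjl : j < l.length := by omega
    rw [List.getElem?_eq_getElem hjl] at this
    simp only [pvNotHex] at this
    simp only [decide_eq_true_eq]
    rw [← hcj]
    exact (pvHexAB l[j]).mp (by simpa using this)
  · rintro ⟨hlen, hall⟩ c? ⟨j, hj, rfl⟩
    have hjl : j < l.length := by omega
    rw [List.getElem?_eq_getElem hjl]
    have := hall l[j] (by rw [List.mem_take_iff_getElem]; exact ⟨j, by omega, rfl⟩)
    simp only [decide_eq_true_eq] at this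
    simp [pvNotHex, (pvHexAB l[j]).mpr this]

theorem pvTake7_getD (l : List Char) : (pvTake l 7).getD 6 none = l[6]? := rfl

theorem pvTake7_take6 (l : List Char) : (pvTake l 7).take 6 = pvTake l 6 := rfl

-- A's scanner computes the character-level spec
theorem pvMain (s : List Char) : ∀ (f i : Nat), s.length - i < f → pvAGo s f i = pvB (s.drop i) := by
  intro f
  induction f with
  | zero => intro i h; omega
  | succ f ih =>
  intro i hf
  have hdropc : ∀ j, j < s.length → s.drop j = s.getD j ' ' :: s.drop (j + 1) := fun j hj => by
    rw [List.drop_eq_getElem_cons hj, List.getD_eq_getElem s ' ' hj]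
  simp only [pvAGo]
  by_cases hi : i < s.length
  · rw [if_pos hi, hdropc i hi]
    by_cases hch : s.getD i ' ' ≠ '&'
    · rw [if_pos hch, pvB_plain _ _ hch]
      exact ih (i + 1) (by omega)
    · push_neg at hch
      rw [if_neg (not_not_intro hch), hch]
      by_cases h2 : i + 1 ≥ s.length
      · rw [if_pos h2, List.drop_of_length_le (by omega : s.length ≤ i + 1), pvB_amp_nil]
      · rw [if_neg h2]
        have h2' : i + 1 < s.length := by omega
        rw [hdropc (i + 1) h2', pvB_amp]
        have e12 : i + 1 + 1 = i + 2 := by omega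
        rw [e12]
        by_cases hc1 : s.getD (i + 1) ' ' = '&'
        · rw [if_pos hc1, if_pos hc1]
          exact ih (i + 2) (by omega)
        · rw [if_neg hc1, if_neg hc1]
          by_cases hc2 : s.getD (i + 1) ' ' = '"'
          · rw [if_pos hc2, if_pos hc2]
            have hk2 : i + 2 ≤ s.length := by omega
            have hqf := pvQuoteFind s (i + 2) hk2
            by_cases hcl : PySem.Chars.findFrom s ['"'] ((i + 2 : Nat) : Int) none = -1
            · rw [if_pos hcl, hqf.1 hcl]
              rfl
            · rw [if_neg hcl, hqf.2 hcl]
              have hge := (PySem.Chars.findFrom_natCast_spec s ['"'] (i + 2) hk2 hcl).1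
              have hge' : i + 2 ≤ (PySem.Chars.findFrom s ['"'] ((i + 2 : Nat) : Int) none).toNat := by omega
              exact ih ((PySem.Chars.findFrom s ['"'] ((i + 2 : Nat) : Int) none).toNat + 1) (by omega)
          · rw [if_neg hc2, if_neg hc2]
            by_cases hc3 : s.getD (i + 1) ' ' = 'K' ∨ s.getD (i + 1) ' ' = 'k'
            · rw [if_pos hc3, if_pos hc3]
              by_cases h3 : i + 2 ≥ s.length
              · rw [if_pos h3]
                have hfirst : (s.drop (i + 2))[0]? = (none : Option Char) := by
                  rw [List.getElem?_drop]
                  exact List.getElem?_eq_none (by omega)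
                rw [hfirst]
                simp [pvNotHex]
              · have h3' : i + 2 < s.length := by omega
                rw [if_neg h3]
                have hfirst : (s.drop (i + 2))[0]? = some (s.getD (i + 2) ' ') := by
                  rw [List.getElem?_drop, List.getD_eq_getElem s ' ' h3']
                  exact List.getElem?_eq_getElem h3'
                rw [hfirst]
                have hd23 : (s.drop (i + 2)).drop 1 = s.drop (i + 3) := by
                  rw [List.drop_drop]
                by_cases hbr : s.getD (i + 2) ' ' = '{'
                · rw [if_pos hbr, if_pos (show (some (s.getD (i + 2) ' ') : Option Char) = some '{' by rw [hbr]), hd23, pvTake7_getD, pvTake7_take6]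
                  have h9 : (s.drop (i + 3))[6]? = s[i + 9]? := by
                    rw [List.getElem?_drop]
                  by_cases hcl9 : i + 9 ≥ s.length ∨ s.getD (i + 9) ' ' ≠ '}'
                  · rw [if_pos hcl9]
                    have hb : (s.drop (i + 3))[6]? ≠ some '}' := by
                      rw [h9]
                      rcases hcl9 with h | h
                      · rw [List.getElem?_eq_none (by omega)]; simp
                      · intro hcon
                        have h9l : i + 9 < s.length := by
                          by_contra hh
                          rw [List.getElem?_eq_none (by omega)] at hcon; simp at hcon
                        rw [List.getElem?_eq_getElem h9l] at hcon
                        exact h (by rw [List.getD_eq_getElem s ' ' h9l]; simpa using hcon)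
                    rw [if_pos (Or.inl hb)]
                  · push_neg at hcl9
                    obtain ⟨h9l, h9c⟩ := hcl9
                    have hb : (s.drop (i + 3))[6]? = some '}' := by
                      rw [h9, List.getElem?_eq_getElem h9l, ← List.getD_eq_getElem s ' ' h9l, h9c]
                    have hsl : PySem.List.slice s (some ((i + 3 : Nat) : Int)) (some ((i + 9 : Nat) : Int)) = (s.drop (i + 3)).take 6 := by
                      rw [PySem.List.slice_natCast]
                      have : i + 9 - (i + 3) = 6 := by omega
                      rw [this]
                    rw [if_neg (show ¬ (i + 9 ≥ s.length ∨ s.getD (i + 9) ' ' ≠ '}') by push_neg; exact ⟨by omega, h9c⟩), hsl]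
                    by_cases hhex : ((s.drop (i + 3)).take 6).all (fun c => decide (c ∈ pvHexA)) = true
                    · have hany : (pvTake (s.drop (i + 3)) 6).any pvNotHex = false :=
                        (pvChunkAll (s.drop (i + 3)) 6).mpr ⟨by simp; omega, hhex⟩
                      rw [if_neg (not_not_intro hhex),
                        if_neg (show ¬ ((s.drop (i + 3))[6]? ≠ some '}' ∨ (pvTake (s.drop (i + 3)) 6).any pvNotHex = true) by simp [hb, hany])]
                      have hd10 : (s.drop (i + 3)).drop 7 = s.drop (i + 10) := by
                        rw [List.drop_drop]
                      rw [hd10]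
                      exact ih (i + 10) (by omega)
                    · have hany : (pvTake (s.drop (i + 3)) 6).any pvNotHex = true := by
                        by_contra hf
                        rw [Bool.not_eq_true] at hf
                        exact hhex ((pvChunkAll (s.drop (i + 3)) 6).mp hf).2
                      rw [if_pos hhex, if_pos (Or.inr hany)]
                · rw [if_neg hbr, if_neg (show ¬ ((some (s.getD (i + 2) ' ') : Option Char) = some '{') from fun hcon => hbr (Option.some.inj hcon)), hd23]
                  have hcons : List.any (some (s.getD (i + 2) ' ') :: pvTake (s.drop (i + 3)) 5) pvNotHex =
                      (pvNotHex (some (s.getD (i + 2) ' ')) || (pvTake (s.drop (i + 3)) 5).any pvNotHex) := by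
                    rw [List.any_cons]
                  by_cases h8 : i + 8 > s.length
                  · rw [if_pos h8]
                    have hany : (pvTake (s.drop (i + 3)) 5).any pvNotHex = true := by
                      by_contra hf
                      rw [Bool.not_eq_true] at hf
                      have := ((pvChunkAll (s.drop (i + 3)) 5).mp hf).1
                      simp at this; omega
                    rw [if_pos (show (some (s.getD (i + 2) ' ') :: pvTake (s.drop (i + 3)) 5).any pvNotHex = true by rw [hcons, hany]; simp)]
                  · have h8' : i + 8 ≤ s.length := by omega
                    rw [if_neg h8]
                    have hsl : PySem.List.slice s (some ((i + 2 : Nat) : Int)) (some ((i + 8 : Nat) : Int)) = s.getD (i + 2) ' ' :: (s.drop (i + 3)).take 5 := by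
                      rw [PySem.List.slice_natCast]
                      have : i + 8 - (i + 2) = 6 := by omega
                      rw [this, hdropc (i + 2) h3']
                      rfl
                    rw [hsl]
                    by_cases hH : (decide (s.getD (i + 2) ' ' ∈ pvHexA) && ((s.drop (i + 3)).take 5).all (fun c => decide (c ∈ pvHexA))) = true
                    · rw [Bool.and_eq_true] at hH
                      have hany : (pvTake (s.drop (i + 3)) 5).any pvNotHex = false :=
                        (pvChunkAll (s.drop (i + 3)) 5).mpr ⟨by simp; omega, hH.2⟩
                      have hH1 : s.getD (i + 2) ' ' ∈ pvHexA := by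
                        have := hH.1; simpa using this
                      have hnh : pvNotHex (some (s.getD (i + 2) ' ')) = false := by
                        simp only [pvNotHex]
                        rw [decide_eq_true ((pvHexAB _).mpr hH1)]
                        rfl
                      rw [if_neg (show ¬ ¬ ((s.getD (i + 2) ' ' :: (s.drop (i + 3)).take 5).all (fun c => decide (c ∈ pvHexA)) = true) by
                          rw [List.all_cons]; exact not_not_intro (by rw [decide_eq_true hH1, hH.2]; rfl)),
                        if_neg (show ¬ ((some (s.getD (i + 2) ' ') :: pvTake (s.drop (i + 3)) 5).any pvNotHex = true) by rw [hcons, hany, hnh]; simp)]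
                      have hd8 : (s.drop (i + 3)).drop 5 = s.drop (i + 8) := by
                        rw [List.drop_drop]
                      rw [hd8]
                      exact ih (i + 8) (by omega)
                    · have hcond : (pvNotHex (some (s.getD (i + 2) ' ')) || (pvTake (s.drop (i + 3)) 5).any pvNotHex) = true := by
                        by_cases hh : s.getD (i + 2) ' ' ∈ pvHexA
                        · have htl : ¬ ((s.drop (i + 3)).take 5).all (fun c => decide (c ∈ pvHexA)) = true := by
                            intro hc; exact hH (by rw [decide_eq_true hh, hc]; rfl)
                          have hany : (pvTake (s.drop (i + 3)) 5).any pvNotHex = true := by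
                            by_contra hf
                            rw [Bool.not_eq_true] at hf
                            exact htl ((pvChunkAll (s.drop (i + 3)) 5).mp hf).2
                          rw [hany, Bool.or_true]
                        · have hnb : s.getD (i + 2) ' ' ∉ pvHexB := fun hx => hh ((pvHexAB _).mp hx)
                          have : pvNotHex (some (s.getD (i + 2) ' ')) = true := by
                            simp only [pvNotHex]
                            rw [decide_eq_false hnb]
                            rfl
                          rw [this, Bool.true_or]
                      rw [if_pos (show ¬ ((s.getD (i + 2) ' ' :: (s.drop (i + 3)).take 5).all (fun c => decide (c ∈ pvHexA)) = true) by rw [List.all_cons]; exact hH),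
                        if_pos (show (some (s.getD (i + 2) ' ') :: pvTake (s.drop (i + 3)) 5).any pvNotHex = true by rw [hcons, hcond])]
            · rw [if_neg hc3, if_neg hc3]
              by_cases hc4 : PySem.Chars.isdigit (s.getD (i + 1) ' ') = true
              · rw [if_pos hc4, if_pos (show (PySem.Chars.isdigit (s.getD (i + 1) ' ') || PySem.Chars.isalpha (s.getD (i + 1) ' ')) = true by rw [hc4]; rfl)]
                have hn1 : s.length = (s.length - 1) + 1 := by omega
                have hd2 : pvDigitEnd s s.length (i + 1) = pvDigitEnd s (s.length - 1) (i + 2) := by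
                  conv_lhs => rw [hn1]
                  exact pvDigitEnd_step s (s.length - 1) (i + 1) ⟨h2', hc4⟩
                have hle := pvDigitEnd_le s (s.length - 1) (i + 2)
                have hskip : pvB (s.drop (i + 2)) = pvB (s.drop (pvDigitEnd s s.length (i + 1))) := by
                  apply pvSkip s (i + 2) (pvDigitEnd s s.length (i + 1)) (by omega)
                  intro t h1 ht2
                  rw [hd2] at ht2
                  exact pvDigit_ne_amp _ (pvDigitEnd_digits s (s.length - 1) (i + 2) t (by omega) ht2)
                rw [hskip]
                exact ih (pvDigitEnd s s.length (i + 1)) (by omega)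
              · rw [if_neg hc4]
                by_cases hc5 : PySem.Chars.isalpha (s.getD (i + 1) ' ') = true
                · rw [if_pos hc5, if_pos (show (PySem.Chars.isdigit (s.getD (i + 1) ' ') || PySem.Chars.isalpha (s.getD (i + 1) ' ')) = true by rw [hc5, Bool.or_true])]
                  exact ih (i + 2) (by omega)
                · rw [if_neg hc5, if_neg (show ¬ ((PySem.Chars.isdigit (s.getD (i + 1) ' ') || PySem.Chars.isalpha (s.getD (i + 1) ' ')) = true) by rw [Bool.or_eq_true]; exact not_or.mpr ⟨hc4, hc5⟩)]
  · rw [if_neg hi, List.drop_of_length_le (by omega), pvB_nil]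

-- ========== bridge: B's segment validator computes the same character-level spec ==========

-- B's hex set agrees with A's hex list
theorem pvHexSetA (c : Char) : (c ∈ pvHexSet) ↔ c ∈ pvHexA := by
  unfold pvHexSet pvHexA
  simp [pysem]

theorem pvHex6_eq (s : List Char) : pvHex6 s = s.all (fun c => decide (c ∈ pvHexA)) := by
  induction s with
  | nil => rfl
  | cons c cs ih =>
    simp only [pvHex6, List.all_cons] at *
    rw [ih, decide_eq_decide.mpr (pvHexSetA c)]

-- the text that a tail of the segment list stands for: one '&' before each segment
def pvJoinAmp : List (List Char) → List Char
  | [] => []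
  | p :: r => '&' :: (p ++ pvJoinAmp r)

-- structural view of splitting on '&'
def pvSplit : List Char → List (List Char)
  | [] => [[]]
  | c :: rest =>
    if c = '&' then [] :: pvSplit rest
    else
      match pvSplit rest with
      | [] => [[c]]
      | p :: ps => (c :: p) :: ps

theorem pvSplit_ne_nil (l : List Char) : pvSplit l ≠ [] := by
  cases l with
  | nil => simp [pvSplit]
  | cons c rest =>
    by_cases h : c = '&'
    · simp [pvSplit, h]
    · cases hr : pvSplit rest <;> simp [pvSplit, h, hr]

theorem pvSplit_no_amp (l : List Char) : ∀ p ∈ pvSplit l, '&' ∉ p := by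
  induction l with
  | nil => simp [pvSplit]
  | cons c rest ih =>
    by_cases h : c = '&'
    · simpa [pvSplit, h] using ih
    · cases hr : pvSplit rest with
      | nil => exact absurd hr (pvSplit_ne_nil rest)
      | cons p0 ps =>
        simp only [pvSplit, if_neg h, hr]
        intro p hp
        rcases List.mem_cons.mp hp with rfl | hp'
        · intro hmem
          rcases List.mem_cons.mp hmem with hc | hmem'
          · exact h hc.symm
          · exact ih p0 (hr ▸ List.mem_cons_self ..) hmem'
        · exact ih p (hr ▸ List.mem_cons_of_mem _ hp')

theorem pvSplit_join (l : List Char) : ∀ p ps, pvSplit l = p :: ps → l = p ++ pvJoinAmp ps := by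
  induction l with
  | nil =>
    intro p ps h
    simp only [pvSplit] at h
    injection h with h1 h2
    subst h1
    subst h2
    rfl
  | cons c rest ih =>
    intro p ps h
    by_cases hc : c = '&'
    · simp only [pvSplit, if_pos hc] at h
      injection h with h1 h2
      subst h1
      subst h2
      cases hr : pvSplit rest with
      | nil => exact absurd hr (pvSplit_ne_nil rest)
      | cons p0 ps0 =>
        have := ih p0 ps0 hr
        simp [hc, hr, pvJoinAmp, this]
    · cases hr : pvSplit rest with
      | nil => exact absurd hr (pvSplit_ne_nil rest)
      | cons p0 ps0 =>
        simp only [pvSplit, if_neg hc, hr] at h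
        injection h with h1 h2
        subst h1
        subst h2
        have := ih p0 ps0 hr
        simp [this]

-- PySem's splitOn (with the one-character separator '&') computes pvSplit
theorem pvGo (l : List Char) : ∀ (fuel : Nat) (cur : List Char) (acc : List (List Char)), l.length ≤ fuel →
    PySem.Chars.splitOn.go ['&'] fuel l cur acc =
      acc.reverse ++ (match pvSplit l with
        | [] => [cur.reverse]
        | p :: ps => (cur.reverse ++ p) :: ps) := by
  induction l with
  | nil =>
    intro fuel cur acc _
    cases fuel <;> simp [PySem.Chars.splitOn.go, pvSplit]
  | cons c rest ih =>
    intro fuel cur acc hf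
    obtain ⟨f, rfl⟩ : ∃ f, fuel = f + 1 := ⟨fuel - 1, by simp at hf; omega⟩
    have hpre : List.isPrefixOf ['&'] (c :: rest) = (c == '&') := by
      simp only [List.isPrefixOf, List.isPrefixOf_nil_left, Bool.and_true]
      simp [eq_comm]
    by_cases hc : c = '&'
    · rw [PySem.Chars.splitOn.go]
      rw [if_pos (by simp [hpre, hc, eq_comm])]
      have hdr : List.drop ['&'].length (c :: rest) = rest := by simp
      rw [hdr, ih f [] (cur.reverse :: acc) (by simp at hf; omega)]
      cases hr : pvSplit rest with
      | nil => exact absurd hr (pvSplit_ne_nil rest)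
      | cons p ps => simp [pvSplit, hc, hr]
    · rw [PySem.Chars.splitOn.go]
      rw [if_neg (by simp [hpre, hc])]
      rw [ih f (c :: cur) acc (by simp at hf; omega)]
      cases hr : pvSplit rest with
      | nil => exact absurd hr (pvSplit_ne_nil rest)
      | cons p ps => simp [pvSplit, hc, hr]

theorem pvSplitOn_eq (l : List Char) : PySem.Chars.splitOn l ['&'] = pvSplit l := by
  unfold PySem.Chars.splitOn
  rw [pvGo l (l.length + 1) [] [] (by omega)]
  cases hr : pvSplit l with
  | nil => exact absurd hr (pvSplit_ne_nil l)
  | cons p ps => simp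

-- plain (amp-free) text in front does not change the spec's verdict
theorem pvB_plain_append (p z : List Char) (hp : '&' ∉ p) : pvB (p ++ z) = pvB z := by
  induction p with
  | nil => rfl
  | cons c p' ih =>
    have hc : c ≠ '&' := fun h => hp (h ▸ List.mem_cons_self ..)
    rw [List.cons_append, pvB_plain c _ hc, ih (fun h => hp (List.mem_cons_of_mem _ h))]

theorem pvJoinAmp_hz (r : List (List Char)) : pvJoinAmp r = [] ∨ (pvJoinAmp r)[0]? = some '&' := by
  cases r <;> simp [pvJoinAmp]

theorem pvQuoteScan_append_not (a z : List Char) (ha : '"' ∉ a) : pvQuoteScan (a ++ z) = pvQuoteScan z := by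
  induction a with
  | nil => rfl
  | cons d rest ih =>
    have hd : d ≠ '"' := fun h => ha (h ▸ List.mem_cons_self ..)
    rw [List.cons_append, pvQuoteScan, if_neg hd, ih (fun h => ha (List.mem_cons_of_mem _ h))]

theorem pvQuoteScan_append_found (a z : List Char) (ha : '"' ∈ a) :
    pvQuoteScan (a ++ z) = (true, (pvQuoteScan a).2 ++ z) := by
  induction a with
  | nil => cases ha
  | cons d rest ih =>
    by_cases hd : d = '"'
    · simp [pvQuoteScan, hd]
    · have hrest : '"' ∈ rest := by
        rcases List.mem_cons.mp ha with h | h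
        · exact absurd h.symm hd
        · exact h
      rw [List.cons_append, pvQuoteScan, if_neg hd, ih hrest, pvQuoteScan, if_neg hd]

theorem pvQuoteScan_snd_suffix (a : List Char) : (pvQuoteScan a).2 <:+ a := by
  induction a with
  | nil => simp [pvQuoteScan]
  | cons d rest ih =>
    by_cases hd : d = '"'
    · simp [pvQuoteScan, hd, List.suffix_cons]
    · simp only [pvQuoteScan, if_neg hd]
      exact ih.trans (List.suffix_cons d rest)

-- the isIn test used by B reads: '"' occurs in the segment
theorem pvIsIn_quote (q : List Char) : PySem.Chars.isIn ['"'] q = true ↔ '"' ∈ q := by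
  rw [PySem.Chars.isIn_iff_infix]
  exact List.singleton_infix_iff '"' q

-- quote scan over the joined tail vs B's segment-level scan
theorem pvLQ (r : List (List Char)) (hr : ∀ p ∈ r, '&' ∉ p) :
    (pvDropNoQuote r = [] → (pvQuoteScan (pvJoinAmp r)).1 = false) ∧
    (∀ q r', pvDropNoQuote r = q :: r' →
      ∃ w, '&' ∉ w ∧ pvQuoteScan (pvJoinAmp r) = (true, w ++ pvJoinAmp r')) := by
  induction r with
  | nil => exact ⟨fun _ => rfl, fun q r' h => by simp [pvDropNoQuote] at h⟩
  | cons q0 r0 ih =>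
    have hq0 : '&' ∉ q0 := hr q0 (List.mem_cons_self ..)
    have hstep : pvQuoteScan (pvJoinAmp (q0 :: r0)) = pvQuoteScan (q0 ++ pvJoinAmp r0) := by
      simp [pvJoinAmp, pvQuoteScan]
    by_cases hin : PySem.Chars.isIn ['"'] q0 = true
    · have hmem : '"' ∈ q0 := (pvIsIn_quote q0).mp hin
      have hdq : pvDropNoQuote (q0 :: r0) = q0 :: r0 := by simp [pvDropNoQuote, hin]
      refine ⟨fun h => by rw [hdq] at h; simp at h, fun q r' h => ?_⟩
      rw [hdq] at h
      injection h with h1 h2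
      subst h1
      subst h2
      refine ⟨(pvQuoteScan q0).2, fun hw => hq0 ((pvQuoteScan_snd_suffix q0).sublist.mem hw), ?_⟩
      rw [hstep, pvQuoteScan_append_found q0 _ hmem]
    · have hnotmem : '"' ∉ q0 := fun h => hin ((pvIsIn_quote q0).mpr h)
      have hdq : pvDropNoQuote (q0 :: r0) = pvDropNoQuote r0 := by simp [pvDropNoQuote, hin]
      have ih' := ih (fun p hp => hr p (List.mem_cons_of_mem _ hp))
      rw [hstep, pvQuoteScan_append_not q0 _ hnotmem, hdq]
      exact ih'

-- hex chunks read through the '&'-joined stream stay inside the first segment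
theorem pvChunkSplit (p z : List Char) (k : Nat) (hz : z = [] ∨ z[0]? = some '&') :
    ((pvTake (p ++ z) k).any pvNotHex = false) ↔
      (k ≤ p.length ∧ (p.take k).all (fun c => decide (c ∈ pvHexA)) = true) := by
  by_cases hk : k ≤ p.length
  · have he : pvTake (p ++ z) k = pvTake p k := by
      unfold pvTake
      apply List.map_congr_left
      intro j hj
      rw [List.mem_range] at hj
      rw [List.getElem?_append_left (by omega)]
    rw [he]
    exact pvChunkAll p k
  · push_neg at hk
    have hmem : (p ++ z)[p.length]? ∈ pvTake (p ++ z) k :=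
      List.mem_map.mpr ⟨p.length, List.mem_range.mpr hk, rfl⟩
    have hbad : pvNotHex ((p ++ z)[p.length]?) = true := by
      have hz0 : (p ++ z)[p.length]? = z[0]? := by
        rw [List.getElem?_append_right (le_refl _)]
        simp
      rw [hz0]
      rcases hz with rfl | hz'
      · simp [pvNotHex]
      · rw [hz']
        decide
    apply iff_of_false
    · rw [← Bool.not_eq_true, not_not, List.any_eq_true]
      exact ⟨_, hmem, hbad⟩
    · intro h
      omega

-- the brace form: '}' position and hex window read through the joined stream
theorem pvBraceSplit (p z : List Char) (hz : z = [] ∨ z[0]? = some '&') :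
    (¬ ((pvTake (p ++ z) 7).getD 6 none ≠ some '}' ∨ ((pvTake (p ++ z) 7).take 6).any pvNotHex = true)) ↔
      (7 ≤ p.length ∧ p.getD 6 ' ' = '}' ∧ (p.take 6).all (fun c => decide (c ∈ pvHexA)) = true) := by
  rw [pvTake7_getD, pvTake7_take6]
  push_neg
  simp only [ne_eq, Bool.not_eq_true]
  constructor
  · rintro ⟨hcl, hany⟩
    obtain ⟨h6, hhex⟩ := (pvChunkSplit p z 6 hz).mp hany
    have h7 : 7 ≤ p.length := by
      rcases Nat.lt_or_ge p.length 7 with hlt | hge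
      · have hp6 : p.length = 6 := by omega
        have hz0 : (p ++ z)[6]? = z[0]? := by
          rw [← hp6] at hcl ⊢
          rw [List.getElem?_append_right (le_refl _)]
          simp
        rw [hz0] at hcl
        rcases hz with rfl | hz'
        · simp at hcl
        · rw [hz'] at hcl
          simp at hcl
      · exact hge
    refine ⟨h7, ?_, hhex⟩
    have hleft : (p ++ z)[6]? = p[6]? := List.getElem?_append_left (by omega)
    rw [hleft, List.getElem?_eq_getElem (by omega : 6 < p.length)] at hcl
    rw [List.getD_eq_getElem p ' ' (by omega)]
    exact Option.some.inj hcl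
  · rintro ⟨h7, hcl, hhex⟩
    refine ⟨?_, (pvChunkSplit p z 6 hz).mpr ⟨by omega, hhex⟩⟩
    rw [List.getElem?_append_left (by omega : 6 < p.length),
      List.getElem?_eq_getElem (by omega : 6 < p.length), ← List.getD_eq_getElem p ' ' (by omega), hcl]

-- the 6-draw chunk of the non-brace form, as one pvTake
theorem pvTake6_cons (l : List Char) : l[0]? :: pvTake (l.drop 1) 5 = pvTake l 6 := by
  have h : ∀ j : Nat, (l.drop 1)[j]? = l[1 + j]? := fun j => List.getElem?_drop ..
  show l[0]? :: [(l.drop 1)[0]?, (l.drop 1)[1]?, (l.drop 1)[2]?, (l.drop 1)[3]?, (l.drop 1)[4]?] = _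
  rw [h 0, h 1, h 2, h 3, h 4]
  rfl

-- unfolding equations for B's loop
theorem pvBLoop_nil : pvBLoop [] = true := by simp [pvBLoop]

theorem pvBLoop_empty (r : List (List Char)) :
    pvBLoop ([] :: r) = (match r with | [] => false | _ :: r' => pvBLoop r') := by
  rw [pvBLoop.eq_def]
  rfl

theorem pvBLoop_cons (c : Char) (p' : List Char) (r : List (List Char)) :
    pvBLoop ((c :: p') :: r) =
      (if c = '"' then
        if PySem.Chars.isIn ['"'] p' then pvBLoop r
        else match pvDropNoQuote r with | [] => false | _ :: r' => pvBLoop r'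
      else if c = 'K' ∨ c = 'k' then
        if p'.take 1 = ['{'] then
          if p'.length < 8 ∨ p'.getD 7 ' ' ≠ '}' ∨ ¬ pvHex6 (PySem.List.slice p' (some 1) (some 7)) then false
          else pvBLoop r
        else if p'.length < 6 ∨ ¬ pvHex6 (PySem.List.slice p' none (some 6)) then false
        else pvBLoop r
      else if PySem.Chars.isdigit c || PySem.Chars.isalpha c then pvBLoop r
      else false) := by
  rw [pvBLoop.eq_def]
  simp only [List.headD_cons, List.drop_succ_cons, List.drop_zero, reduceCtorEq, if_false]
  cases hdq : pvDropNoQuote r <;> simp [hdq]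

theorem pvDropNoQuote_suffix (l : List (List Char)) : pvDropNoQuote l <:+ l := by
  induction l with
  | nil => simp [pvDropNoQuote]
  | cons q rest ih =>
    by_cases h : PySem.Chars.isIn ['"'] q
    · simp [pvDropNoQuote, h]
    · simp only [pvDropNoQuote, if_neg h]
      exact ih.trans (List.suffix_cons q rest)

-- slice bridges for B's segment-level checks
theorem pvSlice17 (s : List Char) : PySem.List.slice s (some 1) (some 7) = (s.drop 1).take 6 := by
  have := PySem.List.slice_natCast s 1 7
  simpa using this

theorem pvSlice06 (s : List Char) : PySem.List.slice s none (some 6) = s.take 6 := by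
  simp [PySem.List.slice_to]

-- main bridge: B's segment loop equals the character-level spec on the joined tail
theorem pvL1 : ∀ (n : Nat) (segs : List (List Char)), segs.length ≤ n →
    (∀ p ∈ segs, '&' ∉ p) → pvBLoop segs = pvB (pvJoinAmp segs) := by
  intro n
  induction n with
  | zero =>
    intro segs hlen _
    have : segs = [] := by
      cases segs with
      | nil => rfl
      | cons a b => simp at hlen
    rw [this, pvBLoop_nil]
    rfl
  | succ m ih =>
    intro segs hlen hamp
    cases segs with
    | nil => rw [pvBLoop_nil]; rfl
    | cons p r =>
      have hr : ∀ q ∈ r, '&' ∉ q := fun q hq => hamp q (List.mem_cons_of_mem _ hq)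
      have hrlen : r.length ≤ m := by simp at hlen; omega
      cases p with
      | nil =>
        rw [pvBLoop_empty]
        cases r with
        | nil => rfl
        | cons q r' =>
          have hq : '&' ∉ q := hr q (List.mem_cons_self ..)
          have hj : pvJoinAmp ([] :: q :: r') = '&' :: '&' :: (q ++ pvJoinAmp r') := by
            simp [pvJoinAmp]
          rw [hj, pvB_amp, if_pos rfl, pvB_plain_append q _ hq]
          exact ih r' (by simp at hlen; omega) (fun x hx => hr x (List.mem_cons_of_mem _ hx))
      | cons c p' =>
        have hcp : '&' ∉ c :: p' := hamp _ (List.mem_cons_self ..)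
        have hc : c ≠ '&' := fun h => hcp (h ▸ List.mem_cons_self ..)
        have hp' : '&' ∉ p' := fun h => hcp (List.mem_cons_of_mem _ h)
        have hjoin : pvJoinAmp ((c :: p') :: r) = '&' :: c :: (p' ++ pvJoinAmp r) := by
          simp [pvJoinAmp]
        rw [pvBLoop_cons, hjoin, pvB_amp, if_neg hc]
        have hz := pvJoinAmp_hz r
        by_cases hqc : c = '"'
        · rw [if_pos hqc, if_pos hqc]
          by_cases hin : PySem.Chars.isIn ['"'] p' = true
          · have hmem : '"' ∈ p' := (pvIsIn_quote p').mp hin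
            rw [if_pos hin, pvQuoteScan_append_found p' _ hmem]
            have hw : '&' ∉ (pvQuoteScan p').2 :=
              fun h => hp' ((pvQuoteScan_snd_suffix p').sublist.mem h)
            simp only [if_true]
            rw [pvB_plain_append _ _ hw]
            exact ih r hrlen hr
          · rw [if_neg hin]
            have hnm : '"' ∉ p' := fun h => hin ((pvIsIn_quote p').mpr h)
            rw [pvQuoteScan_append_not p' _ hnm]
            have hlq := pvLQ r hr
            cases hdq : pvDropNoQuote r with
            | nil =>
              rw [hlq.1 hdq]
              simp
            | cons q r' =>
              obtain ⟨w, hw, hscan⟩ := hlq.2 q r' hdq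
              rw [hscan]
              simp only [if_true]
              rw [pvB_plain_append w _ hw]
              have hsub : q :: r' <:+ r := hdq ▸ pvDropNoQuote_suffix r
              have hlen' : r'.length ≤ m := by
                have := hsub.length_le
                simp at this
                omega
              exact ih r' hlen' (fun x hx => hr x (hsub.sublist.mem (List.mem_cons_of_mem _ hx)))
        · rw [if_neg hqc, if_neg hqc]
          by_cases hk : c = 'K' ∨ c = 'k'
          · rw [if_pos hk, if_pos hk]
            by_cases hbr : p'.take 1 = ['{']
            · obtain ⟨p'', rfl⟩ : ∃ p'', p' = '{' :: p'' := by
                cases p' with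
                | nil => simp at hbr
                | cons a b =>
                  simp at hbr
                  exact ⟨b, by rw [hbr]⟩
              rw [if_pos hbr]
              have hfirst : (('{' :: p'' ++ pvJoinAmp r))[0]? = some '{' := rfl
              rw [if_pos hfirst]
              have hdrop1 : ('{' :: p'' ++ pvJoinAmp r).drop 1 = p'' ++ pvJoinAmp r := rfl
              rw [hdrop1]
              have hBcond : (('{' :: p'').length < 8 ∨ ('{' :: p'').getD 7 ' ' ≠ '}' ∨
                    ¬ pvHex6 (PySem.List.slice ('{' :: p'') (some 1) (some 7))) ↔
                  ¬ (7 ≤ p''.length ∧ p''.getD 6 ' ' = '}' ∧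
                    (p''.take 6).all (fun x => decide (x ∈ pvHexA)) = true) := by
                rw [pvSlice17, pvHex6_eq]
                simp only [List.length_cons, List.getD_cons_succ, List.drop_succ_cons, List.drop_zero]
                constructor
                · rintro (h | h | h) ⟨h1, h2, h3⟩
                  · omega
                  · exact h h2
                  · exact h h3
                · intro h
                  by_contra hcon
                  push_neg at hcon
                  exact h ⟨by omega, hcon.2.1, hcon.2.2⟩
              by_cases hpass : 7 ≤ p''.length ∧ p''.getD 6 ' ' = '}' ∧
                  (p''.take 6).all (fun x => decide (x ∈ pvHexA)) = true
              · rw [if_neg (fun hA => (hBcond.mp hA) hpass),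
                  if_neg ((pvBraceSplit p'' (pvJoinAmp r) hz).mpr hpass)]
                have hd7 : (p'' ++ pvJoinAmp r).drop 7 = p''.drop 7 ++ pvJoinAmp r :=
                  List.drop_append_of_le_length hpass.1
                rw [hd7, pvB_plain_append _ _ (fun h => hp' (List.mem_cons_of_mem _ (List.mem_of_mem_drop h)))]
                exact ih r hrlen hr
              · rw [if_pos (hBcond.mpr hpass),
                  if_pos (not_not.mp (fun hnc => hpass ((pvBraceSplit p'' (pvJoinAmp r) hz).mp hnc)))]
            · rw [if_neg hbr]
              have hfirst : ((p' ++ pvJoinAmp r))[0]? ≠ some '{' := by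
                cases p' with
                | nil =>
                  simp only [List.nil_append]
                  rcases hz with h0 | h0
                  · rw [h0]; simp
                  · rw [h0]; simp
                | cons a b =>
                  have ha : a ≠ '{' := by
                    intro h; exact hbr (by simp [h])
                  simp [ha]
              rw [if_neg hfirst, pvTake6_cons]
              have hBcond : (p'.length < 6 ∨ ¬ pvHex6 (PySem.List.slice p' none (some 6))) ↔
                  ¬ (6 ≤ p'.length ∧ (p'.take 6).all (fun x => decide (x ∈ pvHexA)) = true) := by
                rw [pvSlice06, pvHex6_eq]
                constructor
                · rintro (h | h) ⟨h1, h2⟩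
                  · omega
                  · exact h h2
                · intro h
                  by_contra hcon
                  push_neg at hcon
                  exact h ⟨by omega, hcon.2⟩
              by_cases hpass : 6 ≤ p'.length ∧ (p'.take 6).all (fun x => decide (x ∈ pvHexA)) = true
              · rw [if_neg (fun hA => (hBcond.mp hA) hpass),
                  if_neg (by
                    rw [Bool.not_eq_true]
                    exact (pvChunkSplit p' (pvJoinAmp r) 6 hz).mpr hpass)]
                have hd6 : ((p' ++ pvJoinAmp r).drop 1).drop 5 = p'.drop 6 ++ pvJoinAmp r := by
                  rw [List.drop_drop, List.drop_append_of_le_length (by omega : 5 + 1 ≤ p'.length)]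
                rw [hd6, pvB_plain_append _ _ (fun h => hp' (List.mem_of_mem_drop h))]
                exact ih r hrlen hr
              · rw [if_pos (hBcond.mpr hpass),
                  if_pos (by
                    rw [← Bool.not_eq_false]
                    exact fun h => hpass ((pvChunkSplit p' (pvJoinAmp r) 6 hz).mp h))]
          · rw [if_neg hk, if_neg hk]
            by_cases hda : (PySem.Chars.isdigit c || PySem.Chars.isalpha c) = true
            · rw [if_pos hda, if_pos hda, pvB_plain_append p' _ hp']
              exact ih r hrlen hr
            · rw [if_neg hda, if_neg hda]

-- ===== VERDICT (by name: the statement is the Claim_ definition above) =====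
theorem validate_header_footer_format_spec : Claim_equal_validate_header_footer_format := by
  intro text _
  unfold Spec_validate_header_footer_format validate_header_footer_format validate_header_footer_format_alt
  match text with
  | none => rfl
  | some t =>
    show pvAGo t.toList (t.toList.length + 1) 0 =
      pvBLoop (List.drop 1 (PySem.Chars.splitOn t.toList ['&']))
    rw [pvSplitOn_eq]
    cases hs : pvSplit t.toList with
    | nil => exact absurd hs (pvSplit_ne_nil _)
    | cons p0 ps =>
      have hjoin := pvSplit_join t.toList p0 ps hs
      have hamp := pvSplit_no_amp t.toList
      have h0 : '&' ∉ p0 := hamp p0 (hs ▸ List.mem_cons_self ..)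
      have hps : ∀ p ∈ ps, '&' ∉ p := fun p hp => hamp p (hs ▸ List.mem_cons_of_mem _ hp)
      have hA := pvMain t.toList (t.toList.length + 1) 0 (by omega)
      rw [hA, List.drop_zero, List.drop_succ_cons, List.drop_zero,
        pvL1 ps.length ps (le_refl _) hps, hjoin, pvB_plain_append p0 _ h0]
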